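-- pv_equiv track=rewrite | github.com/OdradekAI/skill-engineering-guide | skills/auditing/scripts/generate_checklists.py | _compact_ids
-- ===== SOURCE A (Python) =====
-- def _compact_ids(ids):
--     if not ids:
--         return ""
--     if len(ids) == 1:
--         return ids[0]
--     prefix = ids[0].rstrip("0123456789")
--     nums = []
--     for i in ids:
--         p = i.rstrip("0123456789")
--         n = i[len(p):]
--         if p == prefix and n.isdigit():
--             nums.append(int(n))
--         else:
--             return ", ".join(ids)
--     nums.sort()
--     ranges = []
--     start = nums[0]
--     end = nums[0]
--     for n in nums[1:]:
--         if n == end + 1: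
--             end = n
--         else:
--             ranges.append(f"{prefix}{start}" if start == end
--                           else f"{prefix}{start}-{prefix}{end}")
--             start = end = n
--     ranges.append(f"{prefix}{start}" if start == end
--                   else f"{prefix}{start}-{prefix}{end}")
--     return ", ".join(ranges)
-- ===== SOURCE B (Python) =====
-- def _compact_ids(ids):
--     if not ids:
--         return ""
--     if len(ids) == 1:
--         return ids[0]
--     prefix = ids[0].rstrip("0123456789")
--     stems = [s.rstrip("0123456789") for s in ids]
--     if any(p != prefix or not s[len(p):].isdigit() for p, s in zip(stems, ids)):
--         return ", ".join(ids)
--     nums = sorted(int(s[len(p):]) for p, s in zip(stems, ids))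
--     return ", ".join(
--         f"{prefix}{a}" if a == b else f"{prefix}{a}-{prefix}{b}"
--         for a, b in _spans(nums)
--     )
--
--
-- def _spans(nums):
--     """Split a sorted list into maximal runs of consecutive integers,
--     returned as (first, last) pairs."""
--     spans = []
--     rest = nums
--     while rest:
--         first = last = rest[0]
--         rest = rest[1:]
--         while rest and rest[0] == last + 1:
--             last = rest[0]
--             rest = rest[1:]
--         spans.append((first, last))
--     return spans
-- ===== Notes on version B (the rewrite author's own statement) =====
-- stated objective: alternative
-- what changed: Replaces A's single validation loop with in-loop early return and its running start/end boundary scan by staged passes: a map+any validation over (stem, id) pairs, then an accumulator loop that splits the sorted numbers into maximal consecutive (first, last) spans formatted in one comprehension.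
import Mathlib
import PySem

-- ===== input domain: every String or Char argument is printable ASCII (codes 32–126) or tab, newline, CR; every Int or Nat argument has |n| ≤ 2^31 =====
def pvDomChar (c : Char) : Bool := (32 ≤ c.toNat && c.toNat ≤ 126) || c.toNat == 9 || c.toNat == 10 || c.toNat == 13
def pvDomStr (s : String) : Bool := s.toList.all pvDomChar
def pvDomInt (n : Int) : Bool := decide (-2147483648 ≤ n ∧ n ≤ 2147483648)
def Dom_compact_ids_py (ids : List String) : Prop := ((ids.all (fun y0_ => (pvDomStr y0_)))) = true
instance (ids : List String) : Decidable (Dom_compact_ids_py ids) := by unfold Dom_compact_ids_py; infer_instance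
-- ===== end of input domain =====

-- B replaces A's in-loop early-return validation and running start/end range scan by staged
-- passes: map + any for validation, then an accumulator loop splitting the
-- sorted numbers into maximal consecutive spans (objective: alternative decomposition).


-- s.rstrip("0123456789"): drop trailing characters from the literal set "0123456789" (exact:
-- membership in that ASCII set is '0' ≤ c ≤ '9'); used by both Pythons.
def pyRstripDigits (s : String) : String :=
  String.ofList ((s.toList.reverse.dropWhile (fun c => decide ('0' ≤ c) && decide (c ≤ '9'))).reverse)

-- ===== PORT A =====
-- f"{prefix}{start}" / f"{prefix}{start}-{prefix}{end}"
def pvFmtA (pre : String) (s e : Int) : String :=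
  if s == e then pre ++ PySem.Int.toStr s
  else pre ++ PySem.Int.toStr s ++ "-" ++ pre ++ PySem.Int.toStr e

-- A's first loop: 'for i in ids: … nums.append(int(n)) … else: return ", ".join(ids)'
-- (none = the early return was taken).  int(n) is guarded by n.isdigit(), so ofStr? is some;
-- getD 0 is never the value used.
def pvValLoopA (pre : String) : List String → List Int → Option (List Int)
  | [], nums => some nums
  | i :: rest, nums =>
    let p := pyRstripDigits i
    let n := PySem.Str.slice i (some (PySem.Str.len p)) none
    if p == pre && PySem.Str.strIsdigit n then
      pvValLoopA pre rest (nums ++ [(PySem.Int.ofStr? n).getD 0])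
    else none

-- A's second loop over nums[1:], carrying start/end and the ranges accumulator.
def pvRangeLoopA (pre : String) : List Int → Int → Int → List String → List String
  | [], s, e, ranges => ranges ++ [pvFmtA pre s e]
  | n :: ns, s, e, ranges =>
    if n == e + 1 then pvRangeLoopA pre ns s n ranges
    else pvRangeLoopA pre ns n n (ranges ++ [pvFmtA pre s e])

def compact_ids_py (ids : List String) : String :=
  match ids with
  | [] => ""                                  -- if not ids
  | i0 :: rest =>
    if rest = [] then i0                      -- if len(ids) == 1: return ids[0]
    else
      let pre := pyRstripDigits i0
      match pvValLoopA pre (i0 :: rest) [] with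
      | none => PySem.Str.join ", " ids
      | some nums =>
        match PySem.List.sorted nums (fun x => x) false with
        | [] => ""                            -- unreachable: ids ≠ [] so nums ≠ []
        | m :: ms => PySem.Str.join ", " (pvRangeLoopA pre ms m m [])

-- ===== PORT B =====
-- _spans's inner while loop: extend the current run; returns (last, unconsumed rest).
def pvSpanStep (last : Int) : List Int → Int × List Int
  | [] => (last, [])
  | n :: ns => if n == last + 1 then pvSpanStep n ns else (last, n :: ns)

theorem pvSpanStep_rest_le (last : Int) (xs : List Int) :
    (pvSpanStep last xs).2.length ≤ xs.length := by
  induction xs generalizing last with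
  | nil => simp [pvSpanStep]
  | cons n ns ih =>
    simp only [pvSpanStep]
    split
    · exact le_trans (ih n) (Nat.le_succ _)
    · simp

-- _spans's outer while loop: peel one span at a time, appending to the accumulator.
def pvSpansLoop (acc : List (Int × Int)) : List Int → List (Int × Int)
  | [] => acc
  | n :: ns => pvSpansLoop (acc ++ [(n, (pvSpanStep n ns).1)]) (pvSpanStep n ns).2
termination_by rest => rest.length
decreasing_by
  have := pvSpanStep_rest_le n ns
  simp only [List.length_cons]
  omega

-- _spans
def pvSpansB (nums : List Int) : List (Int × Int) := pvSpansLoop [] nums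

def pvBadB (pre p s : String) : Bool :=
  !(p == pre) || !(PySem.Str.strIsdigit (PySem.Str.slice s (some (PySem.Str.len p)) none))

def pvNumB (p s : String) : Int :=
  (PySem.Int.ofStr? (PySem.Str.slice s (some (PySem.Str.len p)) none)).getD 0

def pvFmtB (pre : String) : Int × Int → String
  | (a, b) =>
    if a == b then pre ++ PySem.Int.toStr a
    else pre ++ PySem.Int.toStr a ++ "-" ++ pre ++ PySem.Int.toStr b

def compact_ids_py_alt (ids : List String) : String :=
  match ids with
  | [] => ""
  | i0 :: rest =>
    if rest = [] then i0
    else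
      let pre := pyRstripDigits i0
      let stems := ids.map pyRstripDigits
      if (stems.zip ids).any (fun ps => pvBadB pre ps.1 ps.2) then
        PySem.Str.join ", " ids
      else
        let nums := PySem.List.sorted ((stems.zip ids).map (fun ps => pvNumB ps.1 ps.2)) (fun x => x) false
        PySem.Str.join ", " ((pvSpansB nums).map (pvFmtB pre))

-- ===== PRECONDITION & SPEC =====
def Spec_compact_ids_py (ids : List String) (out : String) : Prop := out = compact_ids_py_alt ids
instance (ids : List String) (out : String) : Decidable (Spec_compact_ids_py ids out) := by unfold Spec_compact_ids_py; infer_instance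

-- ===== CLAIM (what is proved, stated in full; the proofs are below) =====
def Claim_equal_compact_ids_py : Prop := ∀ (ids : List String), Dom_compact_ids_py ids → Spec_compact_ids_py ids (compact_ids_py ids)

-- ===== LEMMAS AND PROOFS =====

-- Proof-only: the span decomposition as a cons-building recursion (easier to induct on).
def pvSpans : List Int → List (Int × Int)
  | [] => []
  | n :: ns => (n, (pvSpanStep n ns).1) :: pvSpans (pvSpanStep n ns).2
termination_by xs => xs.length
decreasing_by
  have := pvSpanStep_rest_le n ns
  simp only [List.length_cons]
  omega

theorem pvSpans_nil : pvSpans [] = [] := by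
  simp only [pvSpans]

theorem pvSpans_cons (n : Int) (ns : List Int) :
    pvSpans (n :: ns) = (n, (pvSpanStep n ns).1) :: pvSpans (pvSpanStep n ns).2 := by
  simp only [pvSpans]

theorem pvSpansLoop_eq (acc : List (Int × Int)) (rest : List Int) :
    pvSpansLoop acc rest = acc ++ pvSpans rest := by
  induction acc, rest using pvSpansLoop.induct with
  | case1 acc => simp [pvSpansLoop, pvSpans_nil]
  | case2 acc n ns ih =>
    rw [pvSpansLoop, ih, pvSpans_cons, List.append_assoc, List.singleton_append]

-- A's validation loop is B's staged map/any pass.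
theorem pvValLoopA_eq (pre : String) (ids : List String) (acc : List Int) :
    pvValLoopA pre ids acc =
      if (ids.map pyRstripDigits |>.zip ids).any (fun ps => pvBadB pre ps.1 ps.2) then none
      else some (acc ++ (ids.map pyRstripDigits |>.zip ids).map (fun ps => pvNumB ps.1 ps.2)) := by
  induction ids generalizing acc with
  | nil => simp [pvValLoopA]
  | cons i rest ih =>
    simp only [List.map_cons, List.zip_cons_cons, List.any_cons, pvValLoopA]
    by_cases h : (pyRstripDigits i == pre && PySem.Str.strIsdigit
        (PySem.Str.slice i (some (PySem.Str.len (pyRstripDigits i))) none)) = true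
    · rw [if_pos h, ih]
      rw [Bool.and_eq_true] at h
      have hb : pvBadB pre (pyRstripDigits i) i = false := by
        unfold pvBadB; rw [h.1, h.2]; rfl
      rw [hb, Bool.false_or]
      by_cases ha : ((rest.map pyRstripDigits).zip rest).any (fun ps => pvBadB pre ps.1 ps.2) = true
      · rw [if_pos ha, if_pos ha]
      · rw [if_neg ha, if_neg ha, List.append_assoc, List.singleton_append]
        rfl
    · rw [if_neg h]
      rw [Bool.and_eq_true, not_and_or, Bool.not_eq_true, Bool.not_eq_true] at h
      have hb : pvBadB pre (pyRstripDigits i) i = true := by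
        unfold pvBadB
        rcases h with h | h <;> rw [h] <;> simp
      rw [hb, Bool.true_or, if_pos rfl]

-- A's start/end scan equals the span decomposition, formatted.
theorem pvRangeLoopA_eq (pre : String) (ns : List Int) (s e : Int) (acc : List String) :
    pvRangeLoopA pre ns s e acc =
      acc ++ ((s, (pvSpanStep e ns).1) :: pvSpans (pvSpanStep e ns).2).map (pvFmtB pre) := by
  induction ns generalizing s e acc with
  | nil => simp [pvRangeLoopA, pvSpanStep, pvSpans_nil, pvFmtA, pvFmtB]
  | cons n ns ih =>
    simp only [pvRangeLoopA, pvSpanStep]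
    by_cases h : (n == e + 1) = true
    · rw [if_pos h, if_pos h, ih]
    · rw [if_neg h, if_neg h, ih, pvSpans_cons]
      simp [pvFmtA, pvFmtB, List.append_assoc]

theorem compact_ids_py_spec_aux (ids : List String) :
    compact_ids_py ids = compact_ids_py_alt ids := by
  match ids with
  | [] => rfl
  | i0 :: rest =>
    simp only [compact_ids_py, compact_ids_py_alt]
    by_cases hr : rest = []
    · simp [hr]
    · rw [if_neg hr, if_neg hr, pvValLoopA_eq]
      by_cases hbad : (((i0 :: rest).map pyRstripDigits).zip (i0 :: rest)).any
          (fun ps => pvBadB (pyRstripDigits i0) ps.1 ps.2) = true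
      · rw [if_pos hbad, if_pos hbad]
      · rw [if_neg hbad, if_neg hbad, List.nil_append]
        dsimp only
        have hne : (((i0 :: rest).map pyRstripDigits).zip (i0 :: rest)).map
            (fun ps => pvNumB ps.1 ps.2) ≠ [] := by simp
        cases hs : PySem.List.sorted ((((i0 :: rest).map pyRstripDigits).zip (i0 :: rest)).map
            (fun ps => pvNumB ps.1 ps.2)) (fun x => x) false with
        | nil =>
          exact absurd ((PySem.List.sorted_eq_nil_iff _ _ _).mp hs) hne
        | cons m ms =>
          dsimp only
          rw [pvRangeLoopA_eq, pvSpansB, pvSpansLoop_eq, pvSpans_cons, List.nil_append,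
            List.nil_append]

-- ===== VERDICT (by name: the statement is the Claim_ definition above) =====
theorem compact_ids_py_spec : Claim_equal_compact_ids_py := by
  intro ids _
  exact compact_ids_py_spec_aux ids
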